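-- pv_equiv track=rewrite | github.com/zafazu/My-Discord-Theme | Injector/src/inject.py | select_renderer_target
-- ===== SOURCE A (Python) =====
-- def select_renderer_target(targets):
--     if not targets:
--         return None
--     for t in targets:
--         url = (t.get("url") or "").lower()
--         if url.startswith("https://discord.com/channels") or url.startswith("https://discord.com/app"):
--             return t
--     for t in targets:
--         url = (t.get("url") or "").lower()
--         if url.startswith("https://") and "discord" in url:
--             return t
--     for t in targets:
--         if t.get("type", "").lower() == "page":
--             return t
--     return None
-- ===== SOURCE B (Python) =====
-- def select_renderer_target(targets):
--     # Single pass: each target gets its minimal priority tier (1..3, 4 = none);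
--     # keep the earliest target whose tier is strictly lower than the best so far.
--     best_tier = 4
--     best = None
--     for t in targets:
--         url = (t.get("url") or "").lower()
--         if url.startswith("https://discord.com/channels") or url.startswith("https://discord.com/app"):
--             tier = 1
--         elif url.startswith("https://") and "discord" in url:
--             tier = 2
--         elif t.get("type", "").lower() == "page":
--             tier = 3
--         else:
--             tier = 4
--         if tier < best_tier:
--             best_tier = tier
--             best = t
--     return best
-- ===== Notes on version B (the rewrite author's own statement) =====
-- stated objective: alternative
-- what changed: Replaced A's three sequential scans (one per priority rule) by a single pass that assigns each target its minimal tier and keeps the earliest target of strictly lowest tier.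
import Mathlib
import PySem

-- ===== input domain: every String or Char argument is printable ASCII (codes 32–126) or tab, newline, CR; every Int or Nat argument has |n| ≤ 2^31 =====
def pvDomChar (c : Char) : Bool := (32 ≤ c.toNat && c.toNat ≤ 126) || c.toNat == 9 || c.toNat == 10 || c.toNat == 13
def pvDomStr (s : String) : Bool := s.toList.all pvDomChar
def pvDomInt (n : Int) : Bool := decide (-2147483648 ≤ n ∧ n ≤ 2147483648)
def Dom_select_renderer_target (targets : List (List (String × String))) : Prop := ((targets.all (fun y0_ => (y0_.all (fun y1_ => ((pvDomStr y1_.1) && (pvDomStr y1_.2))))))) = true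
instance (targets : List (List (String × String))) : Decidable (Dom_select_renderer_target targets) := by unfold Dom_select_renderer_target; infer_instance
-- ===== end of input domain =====

-- B replaces A's three sequential priority scans by one best-tier pass; objective: alternative (same cost, one pass).

-- ===== PORT A =====
-- url = (t.get("url") or "").lower()  ('or ""' maps None and "" both to "")
def aUrl (t : List (String × String)) : String :=
  PySem.Str.lower (((PySem.Dict.mk t).get? "url").getD "")

-- each 'for t in targets: if …: return t' loop is a first-match scan (List.find?)
def select_renderer_target (targets : List (List (String × String))) : Option (List (String × String)) :=
  if targets = [] then none
  else
    match targets.find? (fun t =>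
        PySem.Str.startswith (aUrl t) "https://discord.com/channels" ||
        PySem.Str.startswith (aUrl t) "https://discord.com/app") with
    | some t => some t
    | none =>
      match targets.find? (fun t =>
          PySem.Str.startswith (aUrl t) "https://" && PySem.Str.isIn "discord" (aUrl t)) with
      | some t => some t
      | none =>
        targets.find? (fun t =>
          PySem.Str.lower ((PySem.Dict.mk t).getD "type" "") == "page")

-- ===== PORT B =====
-- minimal applicable tier of a target (4 = no rule applies)
def bTier (t : List (String × String)) : Nat :=
  let url := PySem.Str.lower (((PySem.Dict.mk t).get? "url").getD "")
  if PySem.Str.startswith url "https://discord.com/channels" ||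
     PySem.Str.startswith url "https://discord.com/app" then 1
  else if PySem.Str.startswith url "https://" && PySem.Str.isIn "discord" url then 2
  else if PySem.Str.lower ((PySem.Dict.mk t).getD "type" "") == "page" then 3
  else 4

-- single pass keeping (best_tier, best); overwrite only on a strictly smaller tier
def select_renderer_target_alt (targets : List (List (String × String))) : Option (List (String × String)) :=
  (targets.foldl
    (fun (st : Nat × Option (List (String × String))) t =>
      let tr := bTier t
      if tr < st.1 then (tr, some t) else st)
    (4, none)).2

-- ===== PRECONDITION & SPEC =====
def Spec_select_renderer_target (targets : List (List (String × String))) (out : Option (List (String × String))) : Prop := out = select_renderer_target_alt targets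
instance (targets : List (List (String × String))) (out : Option (List (String × String))) : Decidable (Spec_select_renderer_target targets out) := by unfold Spec_select_renderer_target; infer_instance

-- ===== CLAIM (what is proved, stated in full; the proofs are below) =====
def Claim_equal_select_renderer_target : Prop := ∀ (targets : List (List (String × String))), Dom_select_renderer_target targets → Spec_select_renderer_target targets (select_renderer_target targets)

-- ===== LEMMAS AND PROOFS =====

-- the three priority predicates, as in A
def pA1 (t : List (String × String)) : Bool :=
  PySem.Str.startswith (aUrl t) "https://discord.com/channels" ||
  PySem.Str.startswith (aUrl t) "https://discord.com/app"
def pA2 (t : List (String × String)) : Bool :=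
  PySem.Str.startswith (aUrl t) "https://" && PySem.Str.isIn "discord" (aUrl t)
def pA3 (t : List (String × String)) : Bool :=
  PySem.Str.lower ((PySem.Dict.mk t).getD "type" "") == "page"

lemma bTier_eq (t : List (String × String)) :
    bTier t = if pA1 t then 1 else if pA2 t then 2 else if pA3 t then 3 else 4 := by
  simp [bTier, pA1, pA2, pA3, aUrl]

lemma bTier_pos (t : List (String × String)) : 1 ≤ bTier t := by
  rw [bTier_eq]; split_ifs <;> omega

-- abstract form of B's scan: first element below tier k, recursing with the found tier
def pick (k : Nat) : List (List (String × String)) → Option (List (String × String))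
  | [] => none
  | x :: ts => if bTier x < k then some ((pick (bTier x) ts).getD x) else pick k ts

lemma foldl_eq_pick (ts : List (List (String × String))) :
    ∀ (k : Nat) (b : Option (List (String × String))),
      (ts.foldl (fun (st : Nat × Option (List (String × String))) t =>
        let tr := bTier t
        if tr < st.1 then (tr, some t) else st) (k, b)).2 = (pick k ts).or b := by
  induction ts with
  | nil => intro k b; simp [pick]
  | cons x ts ih =>
    intro k b
    by_cases h : bTier x < k
    · simp only [List.foldl_cons, ih, pick, if_pos h]
      cases pick (bTier x) ts <;> simp [Option.or]
    · simp only [List.foldl_cons, pick, if_neg h, ih]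

lemma pick_one (ts : List (List (String × String))) : pick 1 ts = none := by
  induction ts with
  | nil => rfl
  | cons x ts ih =>
    have := bTier_pos x
    simp only [pick, ih]
    have : ¬ bTier x < 1 := by omega
    simp [this]

lemma pick_two (ts : List (List (String × String))) : pick 2 ts = ts.find? pA1 := by
  induction ts with
  | nil => rfl
  | cons x ts ih =>
    have h1 := bTier_pos x
    by_cases hp : pA1 x
    · have ht : bTier x = 1 := by rw [bTier_eq, if_pos hp]
      simp [pick, ht, pick_one, hp]
    · have ht : ¬ bTier x < 2 := by rw [bTier_eq, if_neg hp]; split_ifs <;> omega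
      simp [pick, ht, ih, hp]

lemma pick_three (ts : List (List (String × String))) :
    pick 3 ts = (ts.find? pA1).or (ts.find? (fun t => !pA1 t && pA2 t)) := by
  induction ts with
  | nil => rfl
  | cons x ts ih =>
    by_cases hp1 : pA1 x
    · have ht : bTier x = 1 := by rw [bTier_eq, if_pos hp1]
      simp [pick, ht, pick_one, hp1, Option.or]
    · by_cases hp2 : pA2 x
      · have ht : bTier x = 2 := by rw [bTier_eq, if_neg hp1, if_pos hp2]
        simp [pick, ht, pick_two, hp1, hp2]
      · have ht : ¬ bTier x < 3 := by
          rw [bTier_eq, if_neg hp1, if_neg hp2]; split_ifs <;> omega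
        simp [pick, ht, ih, hp1, hp2]

lemma pick_four (ts : List (List (String × String))) :
    pick 4 ts = ((ts.find? pA1).or (ts.find? (fun t => !pA1 t && pA2 t))).or
      (ts.find? (fun t => !pA1 t && !pA2 t && pA3 t)) := by
  induction ts with
  | nil => rfl
  | cons x ts ih =>
    by_cases hp1 : pA1 x
    · have ht : bTier x = 1 := by rw [bTier_eq, if_pos hp1]
      simp [pick, ht, pick_one, hp1, Option.or]
    · by_cases hp2 : pA2 x
      · have ht : bTier x = 2 := by rw [bTier_eq, if_neg hp1, if_pos hp2]
        simp only [pick, ht, pick_two, List.find?_cons, hp1, hp2]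
        cases ts.find? pA1 <;> simp [Option.or]
      · by_cases hp3 : pA3 x
        · have ht : bTier x = 3 := by rw [bTier_eq, if_neg hp1, if_neg hp2, if_pos hp3]
          simp only [pick, ht, pick_three, List.find?_cons, hp1, hp2, hp3]
          cases ts.find? pA1 <;>
            cases ts.find? (fun t => !pA1 t && pA2 t) <;> simp [Option.or]
        · have ht : ¬ bTier x < 4 := by
            rw [bTier_eq, if_neg hp1, if_neg hp2, if_neg hp3]; omega
          simp [pick, ht, ih, hp1, hp2, hp3]

-- restricting a later-priority scan when no earlier-priority element exists
lemma find?_and_not (p q : List (String × String) → Bool)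
    (ts : List (List (String × String))) (h : ∀ x ∈ ts, p x = false) :
    ts.find? (fun t => !p t && q t) = ts.find? q := by
  induction ts with
  | nil => rfl
  | cons x ts ih =>
    have hx : p x = false := h x (by simp)
    simp only [List.find?_cons, hx]
    cases q x <;>
      simp [ih (fun y hy => h y (by simp [hy]))]

lemma A_eq_orChain (targets : List (List (String × String))) (h : targets ≠ []) :
    select_renderer_target targets =
      (targets.find? pA1).or ((targets.find? pA2).or (targets.find? pA3)) := by
  unfold select_renderer_target
  rw [if_neg h]
  show (match targets.find? pA1 with
    | some t => some t
    | none =>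
      match targets.find? pA2 with
      | some t => some t
      | none => targets.find? pA3) = _
  cases targets.find? pA1 <;> cases targets.find? pA2 <;> simp [Option.or]

-- ===== VERDICT (by name: the statement is the Claim_ definition above) =====
theorem select_renderer_target_spec : Claim_equal_select_renderer_target := by
  unfold Claim_equal_select_renderer_target
  intro targets _
  unfold Spec_select_renderer_target
  rw [select_renderer_target_alt, foldl_eq_pick, pick_four, Option.or_none]
  by_cases hnil : targets = []
  · subst hnil; rfl
  · rw [A_eq_orChain targets hnil]
    cases h1 : targets.find? pA1 with
    | some t => simp [Option.or]
    | none =>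
      have hall1 : ∀ x ∈ targets, pA1 x = false := by
        intro x hx
        simpa using List.find?_eq_none.mp h1 x hx
      rw [find?_and_not pA1 pA2 targets hall1]
      simp only [Option.or]
      cases h2 : targets.find? pA2 with
      | some t => simp
      | none =>
        have hall2 : ∀ x ∈ targets, pA2 x = false := by
          intro x hx
          simpa using List.find?_eq_none.mp h2 x hx
        have hfun : (fun t => !pA1 t && !pA2 t && pA3 t)
            = fun t => !pA1 t && (!pA2 t && pA3 t) := by
          funext t; cases pA1 t <;> cases pA2 t <;> cases pA3 t <;> rfl
        rw [hfun, find?_and_not pA1 _ targets hall1, find?_and_not pA2 pA3 targets hall2]
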